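-- pv_equiv track=rewrite | github.com/shiwuwen/spider_for_douban_comment | find_keyword.py | get_detailed_keywords_nums
-- ===== SOURCE A (Python) =====
-- def get_detailed_keywords_nums(count_every_word, keywords_dict):
--     '''
--     统计每个主关键字下的次关键字的频次
--     '''
--     detailed_keywords_nums = {}
--
--     for keyword in keywords_dict.keys():
--         detailed_keywords_nums[keyword] = []
--         for word in count_every_word.keys():
--             if word in keywords_dict[keyword]:
--                 string = word + ':' + str(count_every_word[word])
--                 detailed_keywords_nums[keyword].append(string)
--
--     return detailed_keywords_nums
-- ===== SOURCE B (Python) =====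
-- def get_detailed_keywords_nums(count_every_word, keywords_dict):
--     '''
--     统计每个主关键字下的次关键字的频次
--     (inverted index: one pass over count_every_word instead of one scan per keyword)
--     '''
--     detailed_keywords_nums = {keyword: [] for keyword in keywords_dict}
--     index = {}
--     for keyword, subwords in keywords_dict.items():
--         for word in subwords:
--             index.setdefault(word, set()).add(keyword)
--     for word, count in count_every_word.items():
--         entry = word + ':' + str(count)
--         for keyword in index.get(word, ()):
--             detailed_keywords_nums[keyword].append(entry)
--     return detailed_keywords_nums
-- ===== Notes on version B (the rewrite author's own statement) =====
-- stated objective: faster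
-- what changed: Replaces the per-keyword scan of all counted words (nested membership tests against each keyword's sub-word list) by an inverted index word->set(keywords) built once, then a single pass over count_every_word appending each 'word:count' entry directly to the lists of the keywords that contain it.
import Mathlib
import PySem

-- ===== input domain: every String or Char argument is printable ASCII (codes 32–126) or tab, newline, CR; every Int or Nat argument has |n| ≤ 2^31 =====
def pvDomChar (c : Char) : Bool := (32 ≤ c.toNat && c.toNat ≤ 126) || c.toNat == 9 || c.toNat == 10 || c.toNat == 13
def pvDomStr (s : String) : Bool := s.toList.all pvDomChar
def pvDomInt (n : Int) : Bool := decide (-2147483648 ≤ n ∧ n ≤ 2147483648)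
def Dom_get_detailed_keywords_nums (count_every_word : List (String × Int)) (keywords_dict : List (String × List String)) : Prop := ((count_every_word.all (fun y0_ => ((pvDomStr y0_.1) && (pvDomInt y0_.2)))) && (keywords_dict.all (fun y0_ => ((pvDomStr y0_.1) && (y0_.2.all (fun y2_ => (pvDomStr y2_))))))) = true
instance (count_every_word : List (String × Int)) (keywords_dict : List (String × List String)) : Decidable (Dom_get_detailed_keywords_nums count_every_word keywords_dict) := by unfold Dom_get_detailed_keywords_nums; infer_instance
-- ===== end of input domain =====

-- B replaces A's per-keyword scan of all counted words by an inverted index word→keywords plus one pass over count_every_word (measurably faster); same returned dict.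

-- ===== PORT A =====
-- literal port of A: for each keyword, scan every counted word and test membership in that keyword's sub-word list
def get_detailed_keywords_nums (count_every_word : List (String × Int)) (keywords_dict : List (String × List String)) : List (String × List String) :=
  let cewD : PySem.Dict String Int := PySem.Dict.ofList count_every_word
  let kdD : PySem.Dict String (List String) := PySem.Dict.ofList keywords_dict
  (kdD.keys.foldl (fun (acc : PySem.Dict String (List String)) keyword =>
      cewD.keys.foldl (fun acc word =>
          if (kdD.getD keyword []).contains word then
            -- detailed_keywords_nums[keyword].append(...): keyword is always a present key here, so getD/modify are exact
            acc.modify keyword [] (fun l => l ++ [word ++ ":" ++ PySem.Int.toStr (cewD.getD word 0)])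
          else acc)
        (acc.insert keyword []))
    PySem.Dict.empty).items

-- ===== PORT B =====
-- literal port of Source B: pre-initialized result lists, inverted index word→set(keywords), one pass over count_every_word
def get_detailed_keywords_nums_alt (count_every_word : List (String × Int)) (keywords_dict : List (String × List String)) : List (String × List String) :=
  let kdD : PySem.Dict String (List String) := PySem.Dict.ofList keywords_dict
  let cewD : PySem.Dict String Int := PySem.Dict.ofList count_every_word
  let result0 : PySem.Dict String (List String) :=
    kdD.keys.foldl (fun d k => d.insert k []) PySem.Dict.empty
  -- index.setdefault(word, set()).add(keyword)  ⇔  index[word] = index.get(word, set()) ∪ {keyword}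
  let index : PySem.Dict String (PySem.Set String) :=
    kdD.items.foldl (fun ix p =>
        p.2.foldl (fun ix w => ix.modify w PySem.Set.empty (fun s => PySem.Set.add s p.1)) ix)
      PySem.Dict.empty
  (cewD.items.foldl (fun res p =>
      let entry := p.1 ++ ":" ++ PySem.Int.toStr p.2
      (index.getD p.1 PySem.Set.empty).foldl (fun res kw => res.modify kw [] (fun l => l ++ [entry])) res)
    result0).items

-- ===== PRECONDITION & SPEC =====
def Spec_get_detailed_keywords_nums (count_every_word : List (String × Int)) (keywords_dict : List (String × List String)) (out : List (String × List String)) : Prop := out = get_detailed_keywords_nums_alt count_every_word keywords_dict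
instance (count_every_word : List (String × Int)) (keywords_dict : List (String × List String)) (out : List (String × List String)) : Decidable (Spec_get_detailed_keywords_nums count_every_word keywords_dict out) := by unfold Spec_get_detailed_keywords_nums; infer_instance

-- ===== CLAIM (what is proved, stated in full; the proofs are below) =====
def Claim_equal_get_detailed_keywords_nums : Prop := ∀ (count_every_word : List (String × Int)) (keywords_dict : List (String × List String)), Dom_get_detailed_keywords_nums count_every_word keywords_dict → Spec_get_detailed_keywords_nums count_every_word keywords_dict (get_detailed_keywords_nums count_every_word keywords_dict)

-- ===== LEMMAS AND PROOFS =====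

theorem modify_insert_self (acc : PySem.Dict String (List String)) (k : String) (L : List String) (g : List String → List String) :
    (acc.insert k L).modify k [] g = acc.insert k (g L) := by
  simp [PySem.Dict.modify, PySem.Dict.getD_insert_self, PySem.Dict.insert_insert_self]

-- A's inner loop over the counted words, started right after `acc.insert k L`, just extends the list at k
theorem pvA_inner (ws : List String) (acc : PySem.Dict String (List String)) (k : String)
    (L : List String) (c : String → Bool) (f : String → String) :
    ws.foldl (fun d w => if c w then d.modify k [] (fun l => l ++ [f w]) else d) (acc.insert k L)
      = acc.insert k (L ++ (ws.filter c).map f) := by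
  induction ws generalizing L with
  | nil => simp
  | cons w ws ih =>
    by_cases h : c w
    · simp only [List.foldl_cons, h, if_pos, modify_insert_self, ih, List.filter_cons, List.map_cons]
      simp
    · simp [List.foldl_cons, h, ih]

-- the index's inner loop (one keyword k over its sub-word list)
theorem pvIx_inner (ws : List String) (ix : PySem.Dict String (PySem.Set String)) (k w' : String) :
    (ws.foldl (fun ix w => ix.modify w PySem.Set.empty (fun s => PySem.Set.add s k)) ix).getD w' PySem.Set.empty
      = if w' ∈ ws then PySem.Set.add (ix.getD w' PySem.Set.empty) k else ix.getD w' PySem.Set.empty := by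
  induction ws generalizing ix with
  | nil => simp
  | cons w ws ih =>
    simp only [List.foldl_cons, ih, PySem.Dict.getD_modify, List.mem_cons]
    by_cases hw : w' = w
    · subst hw
      by_cases hm : w' ∈ ws <;>
        simp [hm, PySem.Set.add_of_mem, PySem.Set.mem_add]
    · by_cases hm : w' ∈ ws <;> simp [hw, hm]

-- the full index: its value at w lists (in order) exactly the keys whose sub-word list contains w
theorem pvIx_outer (items : List (String × List String)) (ix : PySem.Dict String (PySem.Set String)) (w : String)
    (hnd : (items.map Prod.fst).Nodup)
    (hfresh : ∀ p ∈ items, ∀ w', p.1 ∉ ix.getD w' PySem.Set.empty) :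
    (items.foldl (fun ix p =>
        p.2.foldl (fun ix w => ix.modify w PySem.Set.empty (fun s => PySem.Set.add s p.1)) ix) ix).getD w PySem.Set.empty
      = ix.getD w PySem.Set.empty ++ ((items.filter (fun p => p.2.contains w)).map Prod.fst) := by
  induction items generalizing ix with
  | nil => simp
  | cons p items ih =>
    simp only [List.map_cons, List.nodup_cons] at hnd
    have hfresh' : ∀ q ∈ items, ∀ w', q.1 ∉ (p.2.foldl (fun ix w => ix.modify w PySem.Set.empty (fun s => PySem.Set.add s p.1)) ix).getD w' PySem.Set.empty := by
      intro q hq w'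
      rw [pvIx_inner]
      have hne : q.1 ≠ p.1 := by
        intro h; exact hnd.1 (h ▸ (List.mem_map_of_mem hq))
      have := hfresh q (List.mem_cons_of_mem _ hq) w'
      split
      · intro hmem
        rcases (PySem.Set.mem_add _ _ _).mp hmem with h | h
        · exact this h
        · exact hne h
      · exact this
    rw [List.foldl_cons, ih _ hnd.2 hfresh', pvIx_inner, List.filter_cons]
    by_cases hm : p.2.contains w
    · have hmem : w ∈ p.2 := by simpa using hm
      rw [PySem.Set.add_of_not_mem (hfresh p List.mem_cons_self w)]
      simp [hmem]
    · have hmem : w ∉ p.2 := by simpa using hm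
      simp [hmem]

-- B's inner append loop over a duplicate-free keyword list
theorem pvB_inner (ks : List String) (res : PySem.Dict String (List String)) (k : String) (e : String)
    (hnd : ks.Nodup) :
    (ks.foldl (fun res kw => res.modify kw [] (fun l => l ++ [e])) res).getD k []
      = if k ∈ ks then res.getD k [] ++ [e] else res.getD k [] := by
  induction ks generalizing res with
  | nil => simp
  | cons kw ks ih =>
    simp only [List.nodup_cons] at hnd
    rw [List.foldl_cons, ih _ hnd.2, PySem.Dict.getD_modify]
    by_cases hk : k = kw
    · subst hk; simp [hnd.1]
    · simp [hk]

theorem update_subset {α : Type} [BEq α] [LawfulBEq α] (s : PySem.Set α) (xs : List α)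
    (h : ∀ x ∈ xs, x ∈ s) : PySem.Set.update s xs = s := by
  rw [PySem.Set.update_eq_append_filter]
  have hf : (PySem.Set.ofList xs).filter (fun y => !(PySem.Set.contains s y)) = [] := by
    apply List.filter_eq_nil_iff.mpr
    intro a ha
    have := h a ((PySem.Set.mem_ofList _ _).mp ha)
    simp [this]
  rw [hf, List.append_nil]

-- B's final pass leaves the key list untouched when every index value is made of existing keys
theorem pvB_keys (l : List (String × Int)) (index : PySem.Dict String (PySem.Set String))
    (res : PySem.Dict String (List String))
    (hsub : ∀ w, ∀ x ∈ index.getD w PySem.Set.empty, x ∈ res.keys) :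
    (l.foldl (fun res p =>
        (index.getD p.1 PySem.Set.empty).foldl (fun res kw => res.modify kw [] (fun L => L ++ [p.1 ++ ":" ++ PySem.Int.toStr p.2])) res) res).keys
      = res.keys := by
  induction l generalizing res with
  | nil => rfl
  | cons p l ih =>
    have hk : ((index.getD p.1 PySem.Set.empty).foldl (fun res kw => res.modify kw [] (fun L => L ++ [p.1 ++ ":" ++ PySem.Int.toStr p.2])) res).keys = res.keys := by
      rw [PySem.Dict.keys_foldl_modify]
      exact update_subset _ _ (hsub p.1)
    rw [List.foldl_cons, ih _ (by intro w x hx; rw [hk]; exact hsub w x hx), hk]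

-- B's final pass: value at key k collects the entries of words whose index set contains k
theorem pvB_outer (l : List (String × Int)) (index : PySem.Dict String (PySem.Set String))
    (res : PySem.Dict String (List String)) (k : String)
    (hnd : ∀ w, (index.getD w PySem.Set.empty).Nodup) :
    (l.foldl (fun res p =>
        (index.getD p.1 PySem.Set.empty).foldl (fun res kw => res.modify kw [] (fun L => L ++ [p.1 ++ ":" ++ PySem.Int.toStr p.2])) res) res).getD k []
      = res.getD k [] ++ (l.filter (fun p => (index.getD p.1 PySem.Set.empty).contains k)).map (fun p => p.1 ++ ":" ++ PySem.Int.toStr p.2) := by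
  induction l generalizing res with
  | nil => simp
  | cons p l ih =>
    rw [List.foldl_cons, ih, pvB_inner _ _ _ _ (hnd p.1), List.filter_cons]
    by_cases hm : k ∈ index.getD p.1 ([] : PySem.Set String) <;> simp [hm]

-- A's whole double loop, abstracted: it builds the dict keyword ↦ filtered-mapped word list
theorem pvA_outer (ks ws : List String) (c : String → String → Bool) (f : String → String → String)
    (d : PySem.Dict String (List String)) (hnd : ks.Nodup) (hfresh : ∀ a ∈ ks, d.contains a = false) :
    (ks.foldl (fun acc keyword =>
        ws.foldl (fun acc word => if c keyword word then acc.modify keyword [] (fun l => l ++ [f keyword word]) else acc)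
          (acc.insert keyword [])) d).items
      = d.items ++ ks.map (fun k => (k, (ws.filter (c k)).map (f k))) := by
  have hstep : (fun (acc : PySem.Dict String (List String)) keyword =>
      ws.foldl (fun acc word => if c keyword word then acc.modify keyword [] (fun l => l ++ [f keyword word]) else acc)
        (acc.insert keyword []))
      = fun acc keyword => acc.insert keyword ((ws.filter (c keyword)).map (f keyword)) := by
    funext acc keyword
    simpa using pvA_inner ws acc keyword [] (c keyword) (f keyword)
  rw [hstep]
  exact PySem.Dict.items_foldl_insert_fresh ks (fun a => a) _ d hfresh (by simpa using hnd)

-- proof-side names for the two dictionaries B builds (used only below the claim)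
def pvIndex (kd : List (String × List String)) : PySem.Dict String (PySem.Set String) :=
  (PySem.Dict.ofList kd (ν := List String)).items.foldl (fun ix p =>
      p.2.foldl (fun ix w => ix.modify w PySem.Set.empty (fun s => PySem.Set.add s p.1)) ix)
    PySem.Dict.empty

def pvResult0 (kd : List (String × List String)) : PySem.Dict String (List String) :=
  (PySem.Dict.ofList kd (ν := List String)).keys.foldl (fun d k => d.insert k []) PySem.Dict.empty

theorem pvB_eq (cew : List (String × Int)) (kd : List (String × List String)) :
    get_detailed_keywords_nums_alt cew kd
      = ((PySem.Dict.ofList cew (ν := Int)).items.foldl (fun res p =>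
          ((pvIndex kd).getD p.1 PySem.Set.empty).foldl (fun res kw => res.modify kw [] (fun l => l ++ [p.1 ++ ":" ++ PySem.Int.toStr p.2])) res)
        (pvResult0 kd)).items := rfl

theorem pvA_eq (cew : List (String × Int)) (kd : List (String × List String)) :
    get_detailed_keywords_nums cew kd
      = (PySem.Dict.ofList kd (ν := List String)).keys.map (fun k =>
          (k, ((PySem.Dict.ofList cew (ν := Int)).keys.filter (fun w => ((PySem.Dict.ofList kd (ν := List String)).getD k []).contains w)).map
                (fun w => w ++ ":" ++ PySem.Int.toStr ((PySem.Dict.ofList cew (ν := Int)).getD w 0)))) := by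
  have h := pvA_outer (PySem.Dict.ofList kd (ν := List String)).keys (PySem.Dict.ofList cew (ν := Int)).keys
      (fun k w => ((PySem.Dict.ofList kd (ν := List String)).getD k []).contains w)
      (fun _ w => w ++ ":" ++ PySem.Int.toStr ((PySem.Dict.ofList cew (ν := Int)).getD w 0))
      PySem.Dict.empty (PySem.Dict.nodup_keys_ofList kd) (fun a _ => PySem.Dict.contains_empty a)
  exact h

-- ===== VERDICT (by name: the statement is the Claim_ definition above) =====
theorem get_detailed_keywords_nums_spec : Claim_equal_get_detailed_keywords_nums := by
  intro cew kd _
  unfold Spec_get_detailed_keywords_nums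
  have hKnd : (PySem.Dict.ofList kd (ν := List String)).keys.Nodup := PySem.Dict.nodup_keys_ofList kd
  have hCnd : (PySem.Dict.ofList cew (ν := Int)).keys.Nodup := PySem.Dict.nodup_keys_ofList cew
  have hKnd' : ((PySem.Dict.ofList kd (ν := List String)).items.map Prod.fst).Nodup := by
    simpa [PySem.Dict.keys] using hKnd
  -- the inverted index, characterized
  have hix : ∀ w, (pvIndex kd).getD w PySem.Set.empty
      = (((PySem.Dict.ofList kd (ν := List String)).items.filter (fun p => p.2.contains w)).map Prod.fst) := by
    intro w
    unfold pvIndex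
    rw [pvIx_outer _ _ _ hKnd' (by intro p _ w'; simp [PySem.Dict.getD_empty])]
    simp [PySem.Dict.getD_empty]
  have hixnd : ∀ w, ((pvIndex kd).getD w PySem.Set.empty).Nodup := by
    intro w; rw [hix]
    exact (List.Sublist.map Prod.fst List.filter_sublist).nodup hKnd'
  -- result0, characterized
  have hr0keys : (pvResult0 kd).keys = (PySem.Dict.ofList kd (ν := List String)).keys := by
    unfold pvResult0
    rw [PySem.Dict.keys_foldl_insert _ (fun _ _ => [])]
    simp [PySem.Set.update_nil_left, PySem.Set.ofList_eq_self_of_nodup _ hKnd]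
  have hr0items : (pvResult0 kd).items
      = (PySem.Dict.ofList kd (ν := List String)).keys.map (fun a => (a, ([] : List String))) := by
    unfold pvResult0
    have h := PySem.Dict.items_foldl_insert_fresh (PySem.Dict.ofList kd (ν := List String)).keys
        (fun a => a) (fun _ => ([] : List String)) PySem.Dict.empty
        (fun a _ => PySem.Dict.contains_empty a) (by rw [List.map_id']; exact hKnd)
    simp at h
    exact h
  have hr0getD : ∀ k ∈ (PySem.Dict.ofList kd (ν := List String)).keys, (pvResult0 kd).getD k [] = [] := by
    intro k hk
    refine PySem.Dict.getD_of_mem_items _ ?_ (by rw [hr0keys]; exact hKnd) []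
    rw [hr0items]
    exact List.mem_map_of_mem hk
  -- membership in an index set ⇔ the keyword's sub-word list contains the word
  have hcont : ∀ k ∈ (PySem.Dict.ofList kd (ν := List String)).keys, ∀ w,
      ((pvIndex kd).getD w PySem.Set.empty).contains k
        = (((PySem.Dict.ofList kd (ν := List String)).getD k []).contains w) := by
    intro k hk w
    have hk' : ∃ x, (k, x) ∈ (PySem.Dict.ofList kd (ν := List String)).items := by
      simpa [PySem.Dict.keys] using hk
    obtain ⟨v, hpmem⟩ := hk'
    have hval : (PySem.Dict.ofList kd (ν := List String)).getD k [] = v :=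
      PySem.Dict.getD_of_mem_items _ hpmem hKnd []
    have hiff : (k ∈ (((PySem.Dict.ofList kd (ν := List String)).items.filter (fun p => p.2.contains w)).map Prod.fst))
        ↔ w ∈ (PySem.Dict.ofList kd (ν := List String)).getD k [] := by
      constructor
      · intro hmem
        obtain ⟨q, hq, hqk⟩ := List.mem_map.mp hmem
        have hq' := List.mem_filter.mp hq
        have hvq : (PySem.Dict.ofList kd (ν := List String)).getD k [] = q.2 :=
          PySem.Dict.getD_of_mem_items _ (show (k, q.2) ∈ _ from hqk ▸ hq'.1) hKnd []
        rw [hvq]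
        simpa using hq'.2
      · intro hw
        refine List.mem_map.mpr ⟨(k, v), List.mem_filter.mpr ⟨hpmem, ?_⟩, rfl⟩
        rw [hval] at hw
        simpa using hw
    rw [hix]
    exact Bool.eq_iff_iff.mpr (by simpa [List.contains_iff_mem] using hiff)
  -- every index set only holds existing keys, so B's final pass keeps result0's key list
  have hsub : ∀ w, ∀ x ∈ (pvIndex kd).getD w PySem.Set.empty, x ∈ (pvResult0 kd).keys := by
    intro w x hx
    rw [hix] at hx
    obtain ⟨p, hp, hpx⟩ := List.mem_map.mp hx
    rw [hr0keys]
    simp only [PySem.Dict.keys]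
    exact hpx ▸ List.mem_map_of_mem (List.mem_filter.mp hp).1
  rw [pvB_eq, pvA_eq]
  have hfk : ((PySem.Dict.ofList cew (ν := Int)).items.foldl (fun res p =>
        ((pvIndex kd).getD p.1 PySem.Set.empty).foldl (fun res kw => res.modify kw [] (fun l => l ++ [p.1 ++ ":" ++ PySem.Int.toStr p.2])) res)
      (pvResult0 kd)).keys = (PySem.Dict.ofList kd (ν := List String)).keys :=
    (pvB_keys _ _ _ hsub).trans hr0keys
  rw [PySem.Dict.items_eq_map_keys _ (hfk ▸ hKnd) [], hfk]
  apply List.map_congr_left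
  intro k hk
  rw [pvB_outer _ _ _ _ hixnd, hr0getD k hk, List.nil_append]
  simp only [Prod.mk.injEq, true_and]
  rw [List.filter_congr (p := fun q : String × Int => ((pvIndex kd).getD q.1 PySem.Set.empty).contains k)
      (q := fun q : String × Int => ((PySem.Dict.ofList kd (ν := List String)).getD k []).contains q.1)
      (l := (PySem.Dict.ofList cew (ν := Int)).items)
      (fun q _ => hcont k hk q.1)]
  simp only [PySem.Dict.keys]
  rw [List.filter_map, List.map_map]
  apply List.map_congr_left
  intro p hp
  have hp' : p ∈ (PySem.Dict.ofList cew (ν := Int)).items := (List.mem_filter.mp hp).1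
  have hv : (PySem.Dict.ofList cew (ν := Int)).getD p.1 0 = p.2 :=
    PySem.Dict.getD_of_mem_items _ (show (p.1, p.2) ∈ _ from by simpa using hp') hCnd 0
  simp [hv]
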